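-- pv_equiv track=rewrite | github.com/Taoge123/OptimizedLeetcode | LeetcodeNew/DynamicProgramming/LC_361_Bomb_Enemy.py | countEInRow
-- ===== SOURCE A (Python) =====
-- def countEInRow(i, row):
--     if len(row) == 1:
--         return 0
--     tempE = 0
--     # move right
--     for j in range(i + 1, len(row)):
--         if row[j] == 'E':
--             tempE += 1
--         if row[j] == 'W':
--             break
--     # move left
--     for j in range(i - 1, -1, -1):
--         if row[j] == 'E':
--             tempE += 1
--         if row[j] == 'W':
--             break
--     return tempE
-- ===== SOURCE B (Python) =====
-- def countEInRow(i, row):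
--     if len(row) == 1:
--         return 0
--     # one pass: per-segment enemy counts (segments split at walls) + segment id per cell
--     counts = [0]
--     seg = []
--     for x in row:
--         seg.append(len(counts) - 1)
--         if x == 'W':
--             counts.append(0)
--         elif x == 'E':
--             counts[-1] += 1
--     x = row[i]
--     k = seg[i]
--     if x == 'W':
--         return counts[k] + counts[k + 1]
--     return counts[k] - (x == 'E')
-- ===== Notes on version B (the rewrite author's own statement) =====
-- stated objective: alternative
-- what changed: Replaces A's two directional scan-until-wall loops by a single forward pass that precomputes per-segment enemy counts (row split at walls) and each cell's segment id, then answers with O(1) table lookups (segment count minus self, or the two segments adjacent to a wall).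
-- outside the precondition, e.g. on countEInRow(-2, ['E', 'E', 'E']): A returns 4, B returns 2; on countEInRow(3, ['E', 'E', 'E']): A returns 3, B raises IndexError
import Mathlib
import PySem

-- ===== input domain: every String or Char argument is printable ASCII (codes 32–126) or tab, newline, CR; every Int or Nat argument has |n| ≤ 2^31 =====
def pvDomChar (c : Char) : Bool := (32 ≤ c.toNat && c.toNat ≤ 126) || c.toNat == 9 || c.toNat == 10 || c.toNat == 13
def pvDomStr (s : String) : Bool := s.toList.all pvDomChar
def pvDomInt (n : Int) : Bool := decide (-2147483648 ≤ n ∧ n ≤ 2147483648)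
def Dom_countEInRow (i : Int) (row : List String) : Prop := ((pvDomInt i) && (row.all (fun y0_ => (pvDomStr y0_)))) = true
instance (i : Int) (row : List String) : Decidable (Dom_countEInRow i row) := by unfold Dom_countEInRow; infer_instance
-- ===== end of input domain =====

-- B replaces A's two directional scan-until-wall loops by one forward pass precomputing per-segment
-- enemy counts and each cell's segment id, answered by table lookups (alternative decomposition; same cost).

-- ===== PORT A =====
-- the body shared by A's two for-loops (count 'E', break at 'W'); row[j] is in range under Pre_
def pvScanA : List Int → List String → Int → Int
  | [], _, t => t
  | j :: js, row, t =>
    let x := PySem.List.pyGetD row j ""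
    let t1 := if x = "E" then t + 1 else t
    if x = "W" then t1 else pvScanA js row t1

def countEInRow (i : Int) (row : List String) : Int :=
  if PySem.List.len row = 1 then 0
  else
    let t1 := pvScanA (PySem.List.pyRange (i + 1) (PySem.List.len row) 1) row 0
    pvScanA (PySem.List.pyRange (i - 1) (-1) (-1)) row t1

-- ===== PORT B =====
-- B's single forward loop: seg.append(len(counts)-1); wall appends a fresh counter, enemy bumps counts[-1]
def pvBuild : List String → List Int × List Int → List Int × List Int
  | [], st => st
  | x :: xs, (counts, seg) =>
    let seg' := seg ++ [PySem.List.len counts - 1]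
    let counts' :=
      if x = "W" then counts ++ [(0 : Int)]
      else if x = "E" then counts.dropLast ++ [counts.getLastD 0 + 1]
      else counts
    pvBuild xs (counts', seg')

def countEInRow_alt (i : Int) (row : List String) : Int :=
  if PySem.List.len row = 1 then 0
  else
    let st := pvBuild row ([0], [])
    let x := PySem.List.pyGetD row i ""
    let k := PySem.List.pyGetD st.2 i 0
    if x = "W" then PySem.List.pyGetD st.1 k 0 + PySem.List.pyGetD st.1 (k + 1) 0
    else PySem.List.pyGetD st.1 k 0 - (if x = "E" then 1 else 0)

-- ===== PRECONDITION & SPEC =====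
-- Pre_ excludes i outside [-len, len) on non-singleton rows: there B's direct row[i] lookup raises
-- IndexError (while A may still return by scanning from beyond the row), and for negative i on rows
-- containing an enemy "E" A's values come from Python's accidental negative-index wraparound during the
-- scans; on enemy-free rows the wraparound is harmless (both return 0), so those stay inside.
def Pre_countEInRow (i : Int) (row : List String) : Prop :=
  row.length = 1 ∨ (0 ≤ i ∧ i < row.length) ∨
    ("E" ∉ row ∧ -(row.length : Int) ≤ i ∧ i < row.length)
instance (i : Int) (row : List String) : Decidable (Pre_countEInRow i row) := by unfold Pre_countEInRow; infer_instance
def pvWitness_countEInRow : Int × List String := (1, ["E", "0", "W", "E"])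

def Spec_countEInRow (i : Int) (row : List String) (out : Int) : Prop := out = countEInRow_alt i row
instance (i : Int) (row : List String) (out : Int) : Decidable (Spec_countEInRow i row out) := by unfold Spec_countEInRow; infer_instance

-- ===== CLAIM (what is proved, stated in full; the proofs are below) =====
def Claim_equal_countEInRow : Prop := ∀ (i : Int) (row : List String), Dom_countEInRow i row → Pre_countEInRow i row → Spec_countEInRow i row (countEInRow i row)

-- ===== LEMMAS AND PROOFS =====

-- ---- A-side characterisation (scan = count E in the wall-free stretch) ----
def pvScanS : List String → Int → Int
  | [], t => t
  | x :: xs, t =>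
    let t1 := if x = "E" then t + 1 else t
    if x = "W" then t1 else pvScanS xs t1

lemma pvScanA_eq_scanS (js : List Int) (row : List String) (t : Int) :
    pvScanA js row t = pvScanS (js.map (fun j => PySem.List.pyGetD row j "")) t := by
  induction js generalizing t with
  | nil => rfl
  | cons j js ih => simp only [pvScanA, pvScanS, List.map_cons]; split <;> simp [ih]

lemma pvScanS_eq_count (xs : List String) (t : Int) :
    pvScanS xs t = t + ((xs.takeWhile (fun x => x != "W")).count "E" : Int) := by
  induction xs generalizing t with
  | nil => simp [pvScanS]
  | cons x xs ih =>
    by_cases hw : x = "W"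
    · subst hw; simp [pvScanS, List.takeWhile_cons]
    · have hp : (x != "W") = true := by simpa using hw
      simp only [pvScanS, List.takeWhile_cons, hp, if_true, if_neg hw, ih]
      by_cases he : x = "E"
      · subst he; simp [List.count_cons]; ring
      · simp [List.count_cons, he]

lemma map_pyGetD_range_take (row : List String) (n : Nat) (hn : n ≤ row.length) :
    (PySem.List.pyRange 0 (n : Int) 1).map (fun j => PySem.List.pyGetD row j "") = row.take n := by
  induction n with
  | zero => simp [PySem.List.pyRange_one_eq_nil]
  | succ m ih =>
    have h1 : (0 : Int) ≤ m := by positivity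
    have hm : m < row.length := by omega
    rw [show ((m + 1 : Nat) : Int) = (m : Int) + 1 by push_cast; ring]
    rw [PySem.List.pyRange_one_succ_right h1, List.map_append, ih (by omega), List.take_add_one]
    simp [List.getElem?_eq_getElem hm, List.getD, List.getElem?_eq_getElem hm]

lemma scanA_right (row : List String) (n : Nat) (t : Int) :
    pvScanA (PySem.List.pyRange ((n : Int) + 1) ((row.length : Int)) 1) row t
      = t + (((row.drop (n + 1)).takeWhile (fun x => x != "W")).count "E" : Int) := by
  rw [pvScanA_eq_scanS,
    PySem.List.map_pyGetD_pyRange' row "" (show (0:Int) ≤ (n : Int) + 1 by positivity),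
    show ((n : Int) + 1).toNat = n + 1 from by omega, pvScanS_eq_count]

lemma scanA_left (row : List String) (n : Nat) (t : Int) (hle : n ≤ row.length) :
    pvScanA (PySem.List.pyRange ((n : Int) - 1) (-1) (-1)) row t
      = t + ((((row.take n).reverse).takeWhile (fun x => x != "W")).count "E" : Int) := by
  have hr : PySem.List.pyRange ((n : Int) - 1) (-1) (-1)
      = (PySem.List.pyRange 0 (n : Int) 1).reverse := by
    have h := PySem.List.pyRange_neg_one_eq_reverse ((n : Int) - 1) (-1)
    simpa using h
  rw [pvScanA_eq_scanS, hr, List.map_reverse, map_pyGetD_range_take row n hle, pvScanS_eq_count]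

lemma scanA_no_E (row : List String) (hE : "E" ∉ row) (js : List Int) (t : Int) :
    pvScanA js row t = t := by
  induction js with
  | nil => rfl
  | cons j js ih =>
    have hx : PySem.List.pyGetD row j "" ≠ "E" := by
      simp only [PySem.List.pyGetD]
      cases h : PySem.List.pyGet? row j with
      | none => simp
      | some x =>
        have := PySem.List.mem_of_pyGet?_eq_some row h
        simp only [Option.getD_some]
        exact fun hxe => hE (hxe ▸ this)
    simp only [pvScanA, if_neg hx]
    split <;> simp [ih]

-- ---- B-side characterisation ----
-- E-counts of the wall-separated segments, recursing on the head
def pvSegs : List String → List Int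
  | [] => [0]
  | x :: xs =>
    if x = "W" then 0 :: pvSegs xs
    else ((if x = "E" then (1:Int) else 0) + (pvSegs xs).headD 0) :: (pvSegs xs).tail

def pvAddHead (c : Int) (ys : List Int) : List Int := (c + ys.headD 0) :: ys.tail

-- segment ids k, k or k+1, ...
def pvSegIds : List String → Int → List Int
  | [], _ => []
  | x :: xs, k => k :: pvSegIds xs (if x = "W" then k + 1 else k)

lemma pvSegs_cons_exists (xs : List String) : ∃ h t, pvSegs xs = h :: t := by
  cases xs with
  | nil => exact ⟨0, [], rfl⟩
  | cons x xs =>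
    by_cases hw : x = "W"
    · exact ⟨0, pvSegs xs, by simp only [pvSegs, if_pos hw]⟩
    · exact ⟨(if x = "E" then (1:Int) else 0) + (pvSegs xs).headD 0, (pvSegs xs).tail,
        by simp only [pvSegs, if_neg hw]⟩

lemma pvAddHead_zero (xs : List String) : pvAddHead 0 (pvSegs xs) = pvSegs xs := by
  obtain ⟨h, t, he⟩ := pvSegs_cons_exists xs
  simp [pvAddHead, he]

lemma pvBuild_fst (xs : List String) (cs : List Int) (c : Int) (seg : List Int) :
    (pvBuild xs (cs ++ [c], seg)).1 = cs ++ pvAddHead c (pvSegs xs) := by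
  induction xs generalizing cs c seg with
  | nil => simp [pvBuild, pvSegs, pvAddHead]
  | cons x xs ih =>
    simp only [pvBuild]
    obtain ⟨h, t, hse⟩ := pvSegs_cons_exists xs
    by_cases hw : x = "W"
    · rw [if_pos hw]
      rw [show (cs ++ [c]) ++ [(0:Int)] = (cs ++ [c]) ++ [(0:Int)] from rfl,
        ih (cs ++ [c]) 0, pvAddHead_zero]
      simp [pvSegs, hw, pvAddHead, hse]
    · rw [if_neg hw]
      by_cases he : x = "E"
      · rw [if_pos he]
        have hrw : (cs ++ [c]).dropLast ++ [(cs ++ [c]).getLastD 0 + 1] = cs ++ [c + 1] := by simp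
        rw [hrw, ih cs (c + 1)]
        simp [pvSegs, hw, he, pvAddHead, hse]
        ring
      · rw [if_neg he, ih cs c]
        simp [pvSegs, hw, he, pvAddHead, hse]

lemma pvBuild_snd (xs : List String) (cs : List Int) (c : Int) (seg : List Int) :
    (pvBuild xs (cs ++ [c], seg)).2 = seg ++ pvSegIds xs (cs.length : Int) := by
  induction xs generalizing cs c seg with
  | nil => simp [pvBuild, pvSegIds]
  | cons x xs ih =>
    simp only [pvBuild]
    have hlen : PySem.List.len (cs ++ [c]) - 1 = (cs.length : Int) := by
      simp [PySem.List.len_eq]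
    by_cases hw : x = "W"
    · rw [if_pos hw, ih (cs ++ [c]) 0]
      simp only [pvSegIds, if_pos hw, hlen]
      have h2 : (((cs ++ [c]).length : Nat) : Int) = (cs.length : Int) + 1 := by
        simp
      rw [h2, List.append_assoc]
      rfl
    · rw [if_neg hw]
      by_cases he : x = "E"
      · rw [if_pos he]
        have hrw : (cs ++ [c]).dropLast ++ [(cs ++ [c]).getLastD 0 + 1] = cs ++ [c + 1] := by simp
        rw [hrw, ih cs (c + 1)]
        simp only [pvSegIds, if_neg hw, hlen]
        rw [List.append_assoc]
        congr 1
      · rw [if_neg he, ih cs c]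
        simp only [pvSegIds, if_neg hw, hlen]
        rw [List.append_assoc]
        congr 1

lemma pvSegIds_getD (xs : List String) (k : Int) (n : Nat) (hn : n < xs.length) :
    (pvSegIds xs k).getD n 0 = k + (((xs.take n).count "W" : Nat) : Int) := by
  induction xs generalizing k n with
  | nil => simp at hn
  | cons x xs ih =>
    cases n with
    | zero => simp [pvSegIds]
    | succ m =>
      have hm : m < xs.length := by simpa using hn
      simp only [pvSegIds, List.getD_cons_succ, List.take_succ_cons, List.count_cons]
      by_cases hw : x = "W"
      · rw [if_pos hw, ih (k + 1) m hm]
        simp [hw]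
        push_cast
        ring
      · rw [if_neg hw, ih k m hm]
        simp [hw]

lemma pvSegs_headD (ys : List String) :
    (pvSegs ys).headD 0 = ((ys.takeWhile (fun x => x != "W")).count "E" : Int) := by
  induction ys with
  | nil => simp [pvSegs]
  | cons y ys ih =>
    by_cases hw : y = "W"
    · simp [pvSegs, hw, List.takeWhile_cons]
    · have hp : (y != "W") = true := by simpa using hw
      obtain ⟨h, t, he⟩ := pvSegs_cons_exists ys
      by_cases hE : y = "E"
      · simp only [List.headD_eq_head?_getD] at ih
        simp [pvSegs, hw, hE, List.takeWhile_cons, hp, List.count_cons, ih]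
        ring
      · simp only [List.headD_eq_head?_getD] at ih
        simp [pvSegs, hw, hE, List.takeWhile_cons, hp, List.count_cons, ih]

-- abbreviations used by the main segment lemma
def pvL (row : List String) (n : Nat) : List String := ((row.take n).reverse).takeWhile (fun x => x != "W")
def pvR (row : List String) (m : Nat) : List String := (row.drop m).takeWhile (fun x => x != "W")

lemma takeWhile_eq_self_of_no_wall (ys : List String) (hW : "W" ∉ ys) :
    ys.takeWhile (fun x => x != "W") = ys := by
  refine List.takeWhile_eq_self_iff.mpr ?_
  intro a ha
  have : a ≠ "W" := fun hh => hW (hh ▸ ha)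
  simpa using this

lemma takeWhile_append_single_wall (ys : List String) :
    (ys ++ ["W"]).takeWhile (fun x => x != "W") = ys.takeWhile (fun x => x != "W") := by
  rw [List.takeWhile_append]
  split
  · next heq =>
    rw [(List.takeWhile_prefix _).eq_of_length heq]
    simp [List.takeWhile_cons]
  · rfl

lemma takeWhile_append_single_ne (ys : List String) (x : String) (hx : x ≠ "W")
    (hW : "W" ∉ ys) :
    (ys ++ [x]).takeWhile (fun x => x != "W") = ys ++ [x] := by
  refine List.takeWhile_eq_self_iff.mpr ?_
  intro a ha
  rcases List.mem_append.mp ha with h | h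
  · have : a ≠ "W" := fun hh => hW (hh ▸ h)
    simpa using this
  · simp at h
    subst h
    simpa using hx

lemma takeWhile_append_single_mem (ys : List String) (x : String)
    (hW : "W" ∈ ys) :
    (ys ++ [x]).takeWhile (fun x => x != "W") = ys.takeWhile (fun x => x != "W") := by
  rw [List.takeWhile_append]
  split
  · next heq =>
    exfalso
    have hself : ys.takeWhile (fun x => x != "W") = ys :=
      (List.takeWhile_prefix _).eq_of_length heq
    have := List.takeWhile_eq_self_iff.mp hself "W" hW
    simp at this
  · rfl

-- the main lemma: segment-count lookups agree with A's directional takeWhile counts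
lemma pvMain (row : List String) (n : Nat) (hn : n < row.length) :
    (row[n]'hn = "W" →
      (pvSegs row).getD ((row.take n).count "W") 0 = ((pvL row n).count "E" : Int) ∧
      (pvSegs row).getD ((row.take n).count "W" + 1) 0 = ((pvR row (n+1)).count "E" : Int)) ∧
    (row[n]'hn ≠ "W" →
      (pvSegs row).getD ((row.take n).count "W") 0
        = ((pvL row n).count "E" : Int) + (if row[n]'hn = "E" then 1 else 0) + ((pvR row (n+1)).count "E" : Int)) := by
  induction row generalizing n with
  | nil => simp at hn
  | cons x xs ih =>
    cases n with
    | zero =>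
      constructor
      · intro hx
        simp only [List.getElem_cons_zero] at hx
        subst hx
        constructor
        · simp [pvSegs, pvL]
        · have := pvSegs_headD xs
          obtain ⟨h, t, he⟩ := pvSegs_cons_exists xs
          simp [pvSegs, pvR, pvL, he] at this ⊢
          simpa using this
      · intro hx
        simp only [List.getElem_cons_zero] at hx
        have := pvSegs_headD xs
        obtain ⟨h, t, he⟩ := pvSegs_cons_exists xs
        simp [pvSegs, hx, pvR, pvL, he, List.takeWhile_cons] at this ⊢
        by_cases hE : x = "E" <;> simp [hE, this]
    | succ m =>
      have hm : m < xs.length := by simpa using hn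
      have ihm := ih m hm
      have hget : (x :: xs)[m + 1]'hn = xs[m]'hm := by simp
      have hLdef : pvL (x :: xs) (m + 1)
          = ((xs.take m).reverse ++ [x]).takeWhile (fun y => y != "W") := by
        simp [pvL, List.take_succ_cons]
      have hRdef : pvR (x :: xs) (m + 2) = pvR xs (m + 1) := by
        simp [pvR]
      have hcnt : ((x :: xs).take (m + 1)).count "W"
          = (if x = "W" then 1 else 0) + (xs.take m).count "W" := by
        simp [List.take_succ_cons, List.count_cons]
        split <;> omega
      by_cases hw : x = "W"
      · -- a wall in front: everything shifts by one segment
        have hsegs : pvSegs (x :: xs) = 0 :: pvSegs xs := by simp [pvSegs, hw]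
        have hL : pvL (x :: xs) (m + 1) = pvL xs m := by
          rw [hLdef, hw, takeWhile_append_single_wall]
          rfl
        rw [hget, hRdef, hL, hcnt, hsegs, if_pos hw, Nat.add_comm 1]
        constructor
        · intro hxm
          refine ⟨?_, ?_⟩
          · rw [List.getD_cons_succ]
            exact (ihm.1 hxm).1
          · rw [List.getD_cons_succ]
            exact (ihm.1 hxm).2
        · intro hxm
          rw [List.getD_cons_succ]
          exact ihm.2 hxm
      · have hsegs : pvSegs (x :: xs)
            = ((if x = "E" then (1:Int) else 0) + (pvSegs xs).headD 0) :: (pvSegs xs).tail := by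
          simp [pvSegs, hw]
        obtain ⟨h, t, he⟩ := pvSegs_cons_exists xs
        rw [hget, hRdef, hcnt, if_neg hw, Nat.zero_add]
        by_cases hkW : "W" ∈ xs.take m
        · -- a wall strictly left of the cell: lookups land past the head segment
          obtain ⟨j, hj⟩ : ∃ j, (xs.take m).count "W" = j + 1 :=
            ⟨(xs.take m).count "W" - 1, by have := List.count_pos_iff.mpr hkW; omega⟩
          have hL : pvL (x :: xs) (m + 1) = pvL xs m := by
            rw [hLdef, takeWhile_append_single_mem _ _ (by simpa using hkW)]
            rfl
          have hidx : ∀ q : Nat, (pvSegs (x :: xs)).getD (q + 1) 0 = (pvSegs xs).getD (q + 1) 0 := by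
            intro q
            rw [hsegs, he]
            simp
          rw [hL, hj]
          constructor
          · intro hxm
            have h1 := (ihm.1 hxm).1
            have h2 := (ihm.1 hxm).2
            rw [hj] at h1 h2
            exact ⟨by rw [hidx j]; exact h1, by rw [hidx (j + 1)]; exact h2⟩
          · intro hxm
            have h1 := ihm.2 hxm
            rw [hj] at h1
            rw [hidx j]
            exact h1
        · -- no wall left of the cell: the head segment absorbs x
          have hk0 : (xs.take m).count "W" = 0 := by
            exact List.count_eq_zero.mpr hkW
          have hnoW : "W" ∉ (xs.take m).reverse := by simpa using hkW
          have hL : pvL (x :: xs) (m + 1) = (xs.take m).reverse ++ [x] := by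
            rw [hLdef, takeWhile_append_single_ne _ _ hw hnoW]
          have hLxs : pvL xs m = (xs.take m).reverse :=
            takeWhile_eq_self_of_no_wall _ hnoW
          have hhead : (pvSegs (x :: xs)).getD 0 0
              = (if x = "E" then (1:Int) else 0) + (pvSegs xs).getD 0 0 := by
            rw [hsegs, he]
            simp
          have hLcnt : ((pvL (x :: xs) (m + 1)).count "E" : Int)
              = ((pvL xs m).count "E" : Int) + (if x = "E" then (1:Int) else 0) := by
            rw [hL, hLxs, List.count_append]
            by_cases hE : x = "E" <;> simp [hE, List.count_singleton]
          rw [hk0]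
          constructor
          · intro hxm
            have h1 := (ihm.1 hxm).1
            have h2 := (ihm.1 hxm).2
            rw [hk0] at h1 h2
            refine ⟨?_, ?_⟩
            · rw [hhead, h1, hLcnt]
              ring
            · rw [he] at h2
              rw [hsegs, he]
              simpa using h2
          · intro hxm
            have h1 := ihm.2 hxm
            rw [hk0] at h1
            rw [hhead, h1, hLcnt]
            ring

lemma pvSegs_mem_zero (xs : List String) (hE : "E" ∉ xs) (v : Int) (hv : v ∈ pvSegs xs) :
    v = 0 := by
  induction xs generalizing v with
  | nil => simpa [pvSegs] using hv
  | cons x xs ih =>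
    have hE' : "E" ∉ xs := fun h => hE (List.mem_cons_of_mem _ h)
    have hxe : x ≠ "E" := fun h => hE (h ▸ List.mem_cons_self ..)
    obtain ⟨h, t, he⟩ := pvSegs_cons_exists xs
    by_cases hw : x = "W"
    · rcases (by simpa [pvSegs, hw] using hv : v = 0 ∨ v ∈ pvSegs xs) with h0 | hmem
      · exact h0
      · exact ih hE' v hmem
    · rcases (by simpa [pvSegs, hw, hxe, he] using hv : v = h ∨ v ∈ t) with h0 | hmem
      · subst h0
        exact ih hE' _ (by rw [he]; exact List.mem_cons_self ..)
      · exact ih hE' v (by rw [he]; exact List.mem_cons_of_mem _ hmem)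

lemma pyGetD_pvSegs_zero (xs : List String) (hE : "E" ∉ xs) (j : Int) :
    PySem.List.pyGetD (pvSegs xs) j 0 = 0 := by
  simp only [PySem.List.pyGetD]
  cases h : PySem.List.pyGet? (pvSegs xs) j with
  | none => simp
  | some v =>
    have := PySem.List.mem_of_pyGet?_eq_some (pvSegs xs) h
    simp [pvSegs_mem_zero xs hE v this]

lemma pvBuild_init (row : List String) :
    pvBuild row ([0], []) = (pvSegs row, pvSegIds row 0) := by
  have h1 := pvBuild_fst row [] 0 []
  have h2 := pvBuild_snd row [] 0 []
  simp only [List.nil_append, pvAddHead_zero] at h1 h2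
  rw [Prod.ext_iff]
  exact ⟨h1, by simpa using h2⟩

-- ===== VERDICT (by name: the statement is the Claim_ definition above) =====
theorem countEInRow_spec : Claim_equal_countEInRow := by
  intro i row _ hpre
  unfold Spec_countEInRow
  by_cases h1 : row.length = 1
  · simp [countEInRow, countEInRow_alt, PySem.List.len_eq, h1]
  · by_cases hmain : 0 ≤ i ∧ i < (row.length : Int)
    case neg =>
      have hE : "E" ∉ row := by
        rcases hpre with h | h | h
        · exact absurd h h1
        · exact absurd h hmain
        · exact h.1
      have hA : countEInRow i row = 0 := by
        simp [countEInRow, PySem.List.len_eq, h1, scanA_no_E row hE]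
      have hxne : PySem.List.pyGetD row i "" ≠ "E" := by
        simp only [PySem.List.pyGetD]
        cases h : PySem.List.pyGet? row i with
        | none => simp
        | some x =>
          have := PySem.List.mem_of_pyGet?_eq_some row h
          simp only [Option.getD_some]
          exact fun hxe => hE (hxe ▸ this)
      have hB : countEInRow_alt i row = 0 := by
        simp only [countEInRow_alt, PySem.List.len_eq, if_neg (by exact_mod_cast h1), pvBuild_init]
        rw [pyGetD_pvSegs_zero row hE, pyGetD_pvSegs_zero row hE]
        split <;> simp
      rw [hA, hB]
    case pos =>
    obtain ⟨n, rfl⟩ : ∃ n : Nat, i = (n : Int) := ⟨i.toNat, by omega⟩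
    have hn : n < row.length := by exact_mod_cast hmain.2
    have hMain := pvMain row n hn
    simp only [countEInRow, countEInRow_alt, PySem.List.len_eq]
    rw [if_neg (by exact_mod_cast h1), if_neg (by exact_mod_cast h1)]
    rw [scanA_right row n 0, scanA_left row n _ (le_of_lt hn)]
    simp only [pvBuild_init]
    have hx : PySem.List.pyGetD row ((n : Int)) "" = row[n]'hn := by
      rw [PySem.List.pyGetD_natCast, List.getD_eq_getElem?_getD, List.getElem?_eq_getElem hn]
      rfl
    have hk : PySem.List.pyGetD (pvSegIds row 0) ((n : Int)) 0
        = (((row.take n).count "W" : Nat) : Int) := by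
      rw [PySem.List.pyGetD_natCast, pvSegIds_getD row 0 n hn]
      ring
    rw [hx, hk]
    have hc1 : PySem.List.pyGetD (pvSegs row) (((row.take n).count "W" : Nat) : Int) 0
        = (pvSegs row).getD ((row.take n).count "W") 0 := PySem.List.pyGetD_natCast ..
    have hc2 : PySem.List.pyGetD (pvSegs row) ((((row.take n).count "W" : Nat) : Int) + 1) 0
        = (pvSegs row).getD ((row.take n).count "W" + 1) 0 := by
      rw [show ((((row.take n).count "W" : Nat) : Int) + 1) = (((row.take n).count "W" + 1 : Nat) : Int) by push_cast; ring]
      exact PySem.List.pyGetD_natCast ..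
    by_cases hW : row[n]'hn = "W"
    · rw [if_pos hW, hc1, hc2, (hMain.1 hW).1, (hMain.1 hW).2]
      simp only [pvL, pvR]
      ring
    · rw [if_neg hW, hc1, hMain.2 hW]
      simp only [pvL, pvR]
      ring
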